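-- pv_equiv track=rewrite | github.com/AxelUlmestig/chatterbot | bot/patterns_dir/adj_inquiry_pattern.py | execute_action
-- ===== SOURCE A (Python) =====
-- def execute_action(knowledge, adjective):
-- 	people = []
-- 	for person, adjectives in knowledge.items():
-- 		for person_adj in adjectives:
-- 			if person_adj.lower() == adjective.lower():
-- 				people.append(person)
--
-- 	if people:
-- 		message = ""
-- 		for index, person in enumerate(people):
-- 			message += person
-- 			if len(people) - index is 1:
-- 				message += "."
-- 			elif len(people) - index is 2:
-- 				message += " and "
-- 			else:
-- 				message += ", "
-- 		return message
-- 	return "No one"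
-- ===== SOURCE B (Python) =====
-- def execute_action(knowledge, adjective):
--     target = adjective.lower()
--     people = [person
--               for person, adjectives in knowledge.items()
--               for adj in adjectives
--               if adj.lower() == target]
--     if not people:
--         return "No one"
--     *init, last = people
--     if not init:
--         return last + "."
--     return ", ".join(init) + " and " + last + "."
-- ===== Notes on version B (the rewrite author's own statement) =====
-- stated objective: idiomatic
-- what changed: people is built with a comprehension (flatMap/filter) instead of nested append loops, and the message is assembled once from init/last slices (join + ' and ' + last) instead of an enumerate loop growing the string with a three-way distance-from-end branch per element; join is linear where A's repeated 'message +=' concatenation is quadratic in the number of matches.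
import Mathlib
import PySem

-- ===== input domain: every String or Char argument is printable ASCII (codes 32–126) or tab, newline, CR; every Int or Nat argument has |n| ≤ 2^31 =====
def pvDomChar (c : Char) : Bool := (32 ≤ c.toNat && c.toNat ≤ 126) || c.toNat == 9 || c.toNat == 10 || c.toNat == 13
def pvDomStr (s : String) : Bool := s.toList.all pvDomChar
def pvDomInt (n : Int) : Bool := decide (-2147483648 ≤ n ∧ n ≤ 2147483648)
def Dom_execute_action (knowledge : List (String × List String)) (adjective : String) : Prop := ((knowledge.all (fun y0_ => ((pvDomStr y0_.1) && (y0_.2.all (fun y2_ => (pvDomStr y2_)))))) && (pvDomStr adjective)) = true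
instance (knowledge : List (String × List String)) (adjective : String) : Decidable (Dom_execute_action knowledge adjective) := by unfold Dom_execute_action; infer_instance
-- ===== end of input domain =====

-- B builds `people` with a comprehension (flatMap/filter) and formats the message from
-- init/last slices (join + " and " + last) instead of A's nested append loops and
-- enumerate loop with a three-way distance-from-end branch; objective: idiomatic.


-- ===== PORT A =====
-- `len(people) - index is 1/2` compares small ints, which CPython interns, so it is `==`
-- on every reachable value (distances > 256 fall into the else branch either way).
def execute_action (knowledge : List (String × List String)) (adjective : String) : String :=
  let people : List String := knowledge.foldl (fun people kv =>
    kv.2.foldl (fun people person_adj =>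
      if PySem.Str.lower person_adj == PySem.Str.lower adjective then people ++ [kv.1]
      else people) people) []
  if !people.isEmpty then
    (PySem.List.enumerate people 0).foldl (fun message ip =>
      let message := message ++ ip.2
      if (people.length : Int) - ip.1 == 1 then message ++ "."
      else if (people.length : Int) - ip.1 == 2 then message ++ " and "
      else message ++ ", ") ""
  else "No one"

-- ===== PORT B =====
def execute_action_alt (knowledge : List (String × List String)) (adjective : String) : String :=
  let target := PySem.Str.lower adjective
  let people : List String := knowledge.flatMap (fun kv =>
    (kv.2.filter (fun adj => PySem.Str.lower adj == target)).map (fun _ => kv.1))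
  if people.isEmpty then "No one"
  else
    let init := people.dropLast
    let last := people.getLast?.getD ""
    if init.isEmpty then last ++ "."
    else PySem.Str.join ", " init ++ " and " ++ last ++ "."

-- ===== PRECONDITION & SPEC =====
def Spec_execute_action (knowledge : List (String × List String)) (adjective : String) (out : String) : Prop := out = execute_action_alt knowledge adjective
instance (knowledge : List (String × List String)) (adjective : String) (out : String) : Decidable (Spec_execute_action knowledge adjective out) := by unfold Spec_execute_action; infer_instance

-- ===== CLAIM (what is proved, stated in full; the proofs are below) =====
def Claim_equal_execute_action : Prop := ∀ (knowledge : List (String × List String)) (adjective : String), Dom_execute_action knowledge adjective → Spec_execute_action knowledge adjective (execute_action knowledge adjective)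

-- ===== LEMMAS AND PROOFS =====

-- canonical shape of the formatted message, used to bridge the two message builders
def pvFmt : List String → String
  | [] => ""
  | [x] => x ++ "."
  | [x, y] => x ++ " and " ++ y ++ "."
  | x :: y :: z :: l => x ++ ", " ++ pvFmt (y :: z :: l)

theorem pv_inner (p target : String) (l : List String) (acc : List String) :
    l.foldl (fun people a => if PySem.Str.lower a == target then people ++ [p] else people) acc
      = acc ++ (l.filter (fun a => PySem.Str.lower a == target)).map (fun _ => p) := by
  induction l generalizing acc with
  | nil => simp
  | cons a t ih =>
    rw [List.foldl_cons, ih, List.filter_cons]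
    by_cases h : (PySem.Str.lower a == target) = true
    · rw [if_pos h, if_pos h]; simp
    · rw [if_neg h, if_neg h]

theorem pv_people (target : String) (kn : List (String × List String)) (acc : List String) :
    kn.foldl (fun people kv =>
        kv.2.foldl (fun people a => if PySem.Str.lower a == target then people ++ [kv.1] else people) people) acc
      = acc ++ kn.flatMap (fun kv => (kv.2.filter (fun a => PySem.Str.lower a == target)).map (fun _ => kv.1)) := by
  induction kn generalizing acc with
  | nil => simp
  | cons kv t ih =>
    rw [List.foldl_cons, ih, pv_inner, List.flatMap_cons, List.append_assoc]

theorem pv_join_step (x y : String) (l : List String) :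
    PySem.Str.join ", " (x :: y :: l) = x ++ ", " ++ PySem.Str.join ", " (y :: l) := by
  have hof : ∀ (J : List Char), String.ofList (',' :: ' ' :: J) = ", " ++ String.ofList J := by
    intro J
    rw [show (',' :: ' ' :: J) = ", ".toList ++ J from rfl, String.ofList_append, String.ofList_toList]
  simp [PySem.Str.join, PySem.Chars.join_cons_cons, String.ofList_append, hof, String.append_assoc]

-- B's slice formula computes pvFmt on nonempty lists
theorem pv_alt_fmt (x : String) (xs : List String) :
    (if (x :: xs).dropLast.isEmpty then ((x :: xs).getLast?.getD "") ++ "."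
     else PySem.Str.join ", " (x :: xs).dropLast ++ " and " ++ ((x :: xs).getLast?.getD "") ++ ".")
      = pvFmt (x :: xs) := by
  induction xs generalizing x with
  | nil => simp [pvFmt]
  | cons y ys ih =>
    cases ys with
    | nil => simp [pvFmt, PySem.Str.join, PySem.Chars.join_singleton, String.ofList_toList,
        String.append_assoc]
    | cons z zs =>
      have h := ih y
      rw [show (y :: z :: zs).dropLast = y :: (z :: zs).dropLast from rfl] at h
      simp only [List.isEmpty_cons, Bool.false_eq_true, if_false, List.getLast?_cons_cons] at h
      rw [show (x :: y :: z :: zs).dropLast = x :: y :: (z :: zs).dropLast from rfl]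
      simp only [List.isEmpty_cons, Bool.false_eq_true, if_false, List.getLast?_cons_cons]
      rw [pv_join_step, show pvFmt (x :: y :: z :: zs) = x ++ ", " ++ pvFmt (y :: z :: zs) from rfl,
        ← h]
      simp [String.append_assoc]

-- A's enumerate loop computes pvFmt on nonempty lists (start index and accumulator generalised)
theorem pv_loop_fmt (n : Nat) (xs : List String) (x : String) (msg : String) (i : Int)
    (h : i + (xs.length : Int) + 1 = (n : Int)) :
    (PySem.List.enumerate (x :: xs) i).foldl (fun message ip =>
        if (n : Int) - ip.1 == 1 then message ++ ip.2 ++ "."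
        else if (n : Int) - ip.1 == 2 then message ++ ip.2 ++ " and "
        else message ++ ip.2 ++ ", ") msg
      = msg ++ pvFmt (x :: xs) := by
  induction xs generalizing x msg i with
  | nil =>
    have hn : (n : Int) - i = 1 := by simp at h; omega
    rw [PySem.List.enumerate_cons, PySem.List.enumerate_nil, List.foldl_cons]
    simp only [beq_iff_eq]
    rw [if_pos hn]
    simp [pvFmt, String.append_assoc]
  | cons y ys ih =>
    have hlen : i + (ys.length : Int) + 2 = (n : Int) := by
      push_cast [List.length_cons] at h; omega
    have hn1 : ¬((n : Int) - i = 1) := by omega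
    rw [PySem.List.enumerate_cons, List.foldl_cons]
    simp only [beq_iff_eq]
    rw [if_neg hn1]
    by_cases h2 : (n : Int) - i = 2
    · rw [if_pos h2]
      cases ys with
      | cons z zs => exfalso; push_cast [List.length_cons] at hlen; omega
      | nil =>
        have hrec := ih y (msg ++ x ++ " and ") (i + 1) (by simp; omega)
        simp only [beq_iff_eq] at hrec
        rw [hrec]
        simp [pvFmt, String.append_assoc]
    · rw [if_neg h2]
      cases ys with
      | nil => exfalso; simp at hlen; omega
      | cons z zs =>
        have hrec := ih y (msg ++ x ++ ", ") (i + 1) (by omega)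
        simp only [beq_iff_eq] at hrec
        rw [hrec, show pvFmt (x :: y :: z :: zs) = x ++ ", " ++ pvFmt (y :: z :: zs) from rfl]
        simp [String.append_assoc]

theorem pv_main (knowledge : List (String × List String)) (adjective : String) :
    execute_action knowledge adjective = execute_action_alt knowledge adjective := by
  unfold execute_action execute_action_alt
  rw [pv_people]
  simp only [List.nil_append]
  cases hp : knowledge.flatMap (fun kv =>
      (kv.2.filter (fun a => PySem.Str.lower a == PySem.Str.lower adjective)).map (fun _ => kv.1)) with
  | nil => simp
  | cons x xs =>
    simp only [List.isEmpty_cons, Bool.not_false, if_true, Bool.false_eq_true, if_false]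
    have e1 := pv_loop_fmt (x :: xs).length xs x "" 0 (by push_cast [List.length_cons]; omega)
    have e3 : ("" : String) ++ pvFmt (x :: xs) = pvFmt (x :: xs) := by simp
    have e2 := pv_alt_fmt x xs
    exact e1.trans (e3.trans e2.symm)

-- ===== VERDICT (by name: the statement is the Claim_ definition above) =====
theorem execute_action_spec : Claim_equal_execute_action := by
  intro knowledge adjective _
  unfold Spec_execute_action
  exact pv_main knowledge adjective
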